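-- pv_equiv track=rewrite | github.com/moosefs/moosefs | mfsscripts/mfscli.py | combineattr
-- ===== SOURCE A (Python) =====
-- def combineattr(attr,defattr):
-- 	attrcolor = ""
-- 	for c in ("0","1","2","3","4","5","6","7","8"):
-- 		if c in defattr:
-- 			attrcolor = c
-- 	for c in ("0","1","2","3","4","5","6","7","8"):
-- 		if c in attr:
-- 			attrcolor = c
-- 	attrjust = ""
-- 	for c in ("l","L","r","R","c","C"):
-- 		if c in defattr:
-- 			attrjust = c
-- 	for c in ("l","L","r","R","c","C"):
-- 		if c in attr:
-- 			attrjust = c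
-- 	return attrcolor+attrjust
-- ===== SOURCE B (Python) =====
-- def combineattr(attr, defattr):
--     color_prio = {'0': 0, '1': 1, '2': 2, '3': 3, '4': 4, '5': 5, '6': 6, '7': 7, '8': 8}
--     just_prio = {'l': 0, 'L': 1, 'r': 2, 'R': 3, 'c': 4, 'C': 5}
--
--     def pick(s, prio):
--         best = ''
--         bestrank = -1
--         for ch in s:
--             r = prio.get(ch, -1)
--             if r > bestrank:
--                 best = ch
--                 bestrank = r
--         return best
--
--     color = pick(attr, color_prio) or pick(defattr, color_prio)
--     just = pick(attr, just_prio) or pick(defattr, just_prio)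
--     return color + just
-- ===== Notes on version B (the rewrite author's own statement) =====
-- stated objective: alternative
-- what changed: Replaces A's four fixed-tuple membership loops (last tuple character found in the string wins) by one rank-keeping scan of each input string against priority dictionaries mapping each attribute character to its rank, combining the attr/defattr picks with Python's 'or'.
import Mathlib
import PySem

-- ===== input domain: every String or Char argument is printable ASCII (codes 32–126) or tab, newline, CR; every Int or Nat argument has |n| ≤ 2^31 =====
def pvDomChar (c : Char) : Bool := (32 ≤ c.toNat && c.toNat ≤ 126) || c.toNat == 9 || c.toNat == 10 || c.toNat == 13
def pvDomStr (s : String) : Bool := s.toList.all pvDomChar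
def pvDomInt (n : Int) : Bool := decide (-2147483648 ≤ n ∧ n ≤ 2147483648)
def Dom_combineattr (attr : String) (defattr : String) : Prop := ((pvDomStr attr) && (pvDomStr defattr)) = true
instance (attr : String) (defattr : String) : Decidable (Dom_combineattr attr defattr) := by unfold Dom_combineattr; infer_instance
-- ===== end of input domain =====

-- B replaces A's four fixed-tuple membership loops by one rank-keeping scan of each input
-- string against a priority dictionary (objective: alternative, same exact results).

-- ===== PORT A =====
-- literal transliteration of A: four loops over the fixed tuples, each overwriting the
-- accumulator when the tuple character occurs in the string ('c in s' = PySem.Str.isIn).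
def combineattr (attr : String) (defattr : String) : String :=
  let attrcolor : String := ""
  let attrcolor := List.foldl (fun (a c : String) => if PySem.Str.isIn c defattr then c else a) attrcolor ["0", "1", "2", "3", "4", "5", "6", "7", "8"]
  let attrcolor := List.foldl (fun (a c : String) => if PySem.Str.isIn c attr then c else a) attrcolor ["0", "1", "2", "3", "4", "5", "6", "7", "8"]
  let attrjust : String := ""
  let attrjust := List.foldl (fun (a c : String) => if PySem.Str.isIn c defattr then c else a) attrjust ["l", "L", "r", "R", "c", "C"]
  let attrjust := List.foldl (fun (a c : String) => if PySem.Str.isIn c attr then c else a) attrjust ["l", "L", "r", "R", "c", "C"]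
  attrcolor ++ attrjust

-- ===== PORT B =====
-- B's priority dicts (Source B: color_prio / just_prio)
def colorPrioD : PySem.Dict Char Int :=
  PySem.Dict.ofList [('0', 0), ('1', 1), ('2', 2), ('3', 3), ('4', 4), ('5', 5), ('6', 6), ('7', 7), ('8', 8)]
def justPrioD : PySem.Dict Char Int :=
  PySem.Dict.ofList [('l', 0), ('L', 1), ('r', 2), ('R', 3), ('c', 4), ('C', 5)]

-- Source B's pick: one scan of s keeping the character of highest rank seen so far
def pickPort (s : String) (prio : PySem.Dict Char Int) : String :=
  (List.foldl (fun (st : String × Int) ch =>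
      let rr := PySem.Dict.getD prio ch (-1)
      if rr > st.2 then (String.ofList [ch], rr) else st) ("", -1) s.toList).1

def combineattr_alt (attr : String) (defattr : String) : String :=
  let color := if pickPort attr colorPrioD ≠ "" then pickPort attr colorPrioD else pickPort defattr colorPrioD
  let just := if pickPort attr justPrioD ≠ "" then pickPort attr justPrioD else pickPort defattr justPrioD
  color ++ just

-- ===== PRECONDITION & SPEC =====
def Spec_combineattr (attr : String) (defattr : String) (out : String) : Prop := out = combineattr_alt attr defattr
instance (attr : String) (defattr : String) (out : String) : Decidable (Spec_combineattr attr defattr out) := by unfold Spec_combineattr; infer_instance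

-- ===== CLAIM (what is proved, stated in full; the proofs are below) =====
def Claim_equal_combineattr : Prop := ∀ (attr : String) (defattr : String), Dom_combineattr attr defattr → Spec_combineattr attr defattr (combineattr attr defattr)

-- ===== LEMMAS AND PROOFS =====
def rkC (ch : Char) : Int := if ch = '0' then 0 else if ch = '1' then 1 else if ch = '2' then 2 else if ch = '3' then 3 else if ch = '4' then 4 else if ch = '5' then 5 else if ch = '6' then 6 else if ch = '7' then 7 else if ch = '8' then 8 else (-1)

def rkJ (ch : Char) : Int := if ch = 'l' then 0 else if ch = 'L' then 1 else if ch = 'r' then 2 else if ch = 'R' then 3 else if ch = 'c' then 4 else if ch = 'C' then 5 else (-1)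

def gC (r : Int) : String := if r = 0 then "0" else if r = 1 then "1" else if r = 2 then "2" else if r = 3 then "3" else if r = 4 then "4" else if r = 5 then "5" else if r = 6 then "6" else if r = 7 then "7" else if r = 8 then "8" else ""

def gJ (r : Int) : String := if r = 0 then "l" else if r = 1 then "L" else if r = 2 then "r" else if r = 3 then "R" else if r = 4 then "c" else if r = 5 then "C" else ""

def dC (r : Int) : Char := if r = 0 then '0' else if r = 1 then '1' else if r = 2 then '2' else if r = 3 then '3' else if r = 4 then '4' else if r = 5 then '5' else if r = 6 then '6' else if r = 7 then '7' else if r = 8 then '8' else '*'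

def dJ (r : Int) : Char := if r = 0 then 'l' else if r = 1 then 'L' else if r = 2 then 'r' else if r = 3 then 'R' else if r = 4 then 'c' else if r = 5 then 'C' else '*'


lemma rkC_le (ch : Char) : rkC ch ≤ 8 := by unfold rkC; split_ifs <;> omega

lemma rkJ_le (ch : Char) : rkJ ch ≤ 5 := by unfold rkJ; split_ifs <;> omega

lemma mk_gC (ch : Char) (h : 0 ≤ rkC ch) : String.ofList [ch] = gC (rkC ch) := by
  unfold rkC at h ⊢; split_ifs at h ⊢ <;> first | omega | (subst_vars; decide)

lemma mk_gJ (ch : Char) (h : 0 ≤ rkJ ch) : String.ofList [ch] = gJ (rkJ ch) := by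
  unfold rkJ at h ⊢; split_ifs at h ⊢ <;> first | omega | (subst_vars; decide)

lemma rkC_inj (ch : Char) (h : 0 ≤ rkC ch) : ch = dC (rkC ch) := by
  unfold rkC at h ⊢; split_ifs at h ⊢ <;> first | omega | (subst_vars; decide)

lemma rkJ_inj (ch : Char) (h : 0 ≤ rkJ ch) : ch = dJ (rkJ ch) := by
  unfold rkJ at h ⊢; split_ifs at h ⊢ <;> first | omega | (subst_vars; decide)


lemma getD_colorPrio (ch : Char) : PySem.Dict.getD colorPrioD ch (-1) = rkC ch := by
  have hi : (colorPrioD).items = [('0', (0:Int)), ('1', 1), ('2', 2), ('3', 3), ('4', 4), ('5', 5), ('6', 6), ('7', 7), ('8', 8)] := by decide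
  simp only [PySem.Dict.getD, PySem.Dict.get?, hi]
  unfold rkC
  split_ifs with h0 h1 h2 h3 h4 h5 h6 h7 h8
  · subst h0; decide
  · subst h1; decide
  · subst h2; decide
  · subst h3; decide
  · subst h4; decide
  · subst h5; decide
  · subst h6; decide
  · subst h7; decide
  · subst h8; decide
  · have hf : List.find? (fun p => p.1 == ch) [('0', (0:Int)), ('1', 1), ('2', 2), ('3', 3), ('4', 4), ('5', 5), ('6', 6), ('7', 7), ('8', 8)] = none := by
      rw [List.find?_eq_none]
      intro x hx
      simp only [List.mem_cons, List.not_mem_nil, or_false] at hx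
      rcases hx with rfl | rfl | rfl | rfl | rfl | rfl | rfl | rfl | rfl
      · exact fun hb => h0 (beq_iff_eq.mp hb).symm
      · exact fun hb => h1 (beq_iff_eq.mp hb).symm
      · exact fun hb => h2 (beq_iff_eq.mp hb).symm
      · exact fun hb => h3 (beq_iff_eq.mp hb).symm
      · exact fun hb => h4 (beq_iff_eq.mp hb).symm
      · exact fun hb => h5 (beq_iff_eq.mp hb).symm
      · exact fun hb => h6 (beq_iff_eq.mp hb).symm
      · exact fun hb => h7 (beq_iff_eq.mp hb).symm
      · exact fun hb => h8 (beq_iff_eq.mp hb).symm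
    rw [hf]
    rfl

lemma getD_justPrio (ch : Char) : PySem.Dict.getD justPrioD ch (-1) = rkJ ch := by
  have hi : (justPrioD).items = [('l', (0:Int)), ('L', 1), ('r', 2), ('R', 3), ('c', 4), ('C', 5)] := by decide
  simp only [PySem.Dict.getD, PySem.Dict.get?, hi]
  unfold rkJ
  split_ifs with h0 h1 h2 h3 h4 h5
  · subst h0; decide
  · subst h1; decide
  · subst h2; decide
  · subst h3; decide
  · subst h4; decide
  · subst h5; decide
  · have hf : List.find? (fun p => p.1 == ch) [('l', (0:Int)), ('L', 1), ('r', 2), ('R', 3), ('c', 4), ('C', 5)] = none := by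
      rw [List.find?_eq_none]
      intro x hx
      simp only [List.mem_cons, List.not_mem_nil, or_false] at hx
      rcases hx with rfl | rfl | rfl | rfl | rfl | rfl
      · exact fun hb => h0 (beq_iff_eq.mp hb).symm
      · exact fun hb => h1 (beq_iff_eq.mp hb).symm
      · exact fun hb => h2 (beq_iff_eq.mp hb).symm
      · exact fun hb => h3 (beq_iff_eq.mp hb).symm
      · exact fun hb => h4 (beq_iff_eq.mp hb).symm
      · exact fun hb => h5 (beq_iff_eq.mp hb).symm
    rw [hf]
    rfl


lemma gC_neg (r : Int) (h : r < 0) : gC r = "" := by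
  unfold gC; split_ifs <;> first | omega | rfl

lemma gJ_neg (r : Int) (h : r < 0) : gJ r = "" := by
  unfold gJ; split_ifs <;> first | omega | rfl

lemma gC_ne (r : Int) (h0 : 0 ≤ r) (h8 : r ≤ 8) : gC r ≠ "" := by
  unfold gC; split_ifs <;> first | omega | decide

lemma gJ_ne (r : Int) (h0 : 0 ≤ r) (h5 : r ≤ 5) : gJ r ≠ "" := by
  unfold gJ; split_ifs <;> first | omega | decide

lemma isInT (t s : String) (c : Char) (ht : t.toList = [c]) (h : c ∈ s.toList) :
    PySem.Str.isIn t s = true := by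
  rw [PySem.Str.isIn_iff_infix, ht, List.singleton_infix_iff]; exact h

lemma isInF (t s : String) (c : Char) (ht : t.toList = [c]) (h : c ∉ s.toList) :
    PySem.Str.isIn t s = false := by
  cases hb : PySem.Str.isIn t s
  · rfl
  · rw [PySem.Str.isIn_iff_infix, ht, List.singleton_infix_iff] at hb
    exact absurd hb h

lemma mf_ge (rk : Char → Int) (l : List Char) : ∀ (r : Int),
    r ≤ List.foldl (fun m x => max m (rk x)) r l := by
  induction l with
  | nil => intro r; exact le_refl r
  | cons c l ih =>
    intro r
    rw [List.foldl_cons]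
    exact le_trans (le_max_left r (rk c)) (ih (max r (rk c)))

lemma mf_mem (rk : Char → Int) (c : Char) (l : List Char) : ∀ (r : Int), c ∈ l →
    rk c ≤ List.foldl (fun m x => max m (rk x)) r l := by
  induction l with
  | nil => intro r h; cases h
  | cons c' l ih =>
    intro r h
    rw [List.foldl_cons]
    rcases List.mem_cons.mp h with h' | h'
    · subst h'
      exact le_trans (le_max_right r (rk c)) (mf_ge rk l (max r (rk c)))
    · exact ih (max r (rk c')) h'

lemma mf_cases (rk : Char → Int) (l : List Char) : ∀ (r : Int),
    List.foldl (fun m x => max m (rk x)) r l = r ∨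
      ∃ c, c ∈ l ∧ List.foldl (fun m x => max m (rk x)) r l = rk c := by
  induction l with
  | nil => intro r; left; rfl
  | cons c l ih =>
    intro r
    rw [List.foldl_cons]
    rcases ih (max r (rk c)) with h | ⟨c', hm, he⟩
    · rcases max_choice r (rk c) with hm | hm
      · left; rw [h, hm]
      · right; exact ⟨c, List.mem_cons_self, by rw [h, hm]⟩
    · right; exact ⟨c', List.mem_cons_of_mem _ hm, he⟩

lemma mf_ub (rk : Char → Int) (N : Int) (hN : ∀ c, rk c ≤ N) (l : List Char) : ∀ (r : Int),
    r ≤ N → List.foldl (fun m x => max m (rk x)) r l ≤ N := by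
  induction l with
  | nil => intro r hr; exact hr
  | cons c l ih =>
    intro r hr
    rw [List.foldl_cons]
    exact ih (max r (rk c)) (max_le hr (hN c))

lemma pick_loop (prio : PySem.Dict Char Int) (rk : Char → Int) (g : Int → String)
    (hd : ∀ ch, PySem.Dict.getD prio ch (-1) = rk ch)
    (hmk : ∀ ch, 0 ≤ rk ch → String.ofList [ch] = g (rk ch))
    (l : List Char) : ∀ (r : Int), -1 ≤ r →
    List.foldl (fun (st : String × Int) ch =>
        let rr := PySem.Dict.getD prio ch (-1)
        if rr > st.2 then (String.ofList [ch], rr) else st) (g r, r) l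
      = (g (List.foldl (fun m x => max m (rk x)) r l),
         List.foldl (fun m x => max m (rk x)) r l) := by
  induction l with
  | nil => intro r _; rfl
  | cons c l ih =>
    intro r hr
    show List.foldl (fun (st : String × Int) ch =>
        let rr := PySem.Dict.getD prio ch (-1)
        if rr > st.2 then (String.ofList [ch], rr) else st)
        (if PySem.Dict.getD prio c (-1) > r then (String.ofList [c], PySem.Dict.getD prio c (-1)) else (g r, r)) l
      = (g (List.foldl (fun m x => max m (rk x)) (max r (rk c)) l),
         List.foldl (fun m x => max m (rk x)) (max r (rk c)) l)
    rw [hd c]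
    by_cases h : rk c > r
    · rw [if_pos h, hmk c (by omega)]
      have hm : max r (rk c) = rk c := by omega
      rw [hm]
      exact ih (rk c) (by omega)
    · rw [if_neg h]
      have hm : max r (rk c) = r := by omega
      rw [hm]
      exact ih r hr

lemma pickPort_eq_color (s : String) :
    pickPort s colorPrioD = gC (List.foldl (fun m x => max m (rkC x)) (-1) s.toList) := by
  unfold pickPort
  rw [(by decide : (("", (-1:Int)) : String × Int) = (gC (-1), (-1:Int)))]
  rw [pick_loop colorPrioD rkC gC getD_colorPrio mk_gC s.toList (-1) (by omega)]

lemma pickPort_eq_just (s : String) :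
    pickPort s justPrioD = gJ (List.foldl (fun m x => max m (rkJ x)) (-1) s.toList) := by
  unfold pickPort
  rw [(by decide : (("", (-1:Int)) : String × Int) = (gJ (-1), (-1:Int)))]
  rw [pick_loop justPrioD rkJ gJ getD_justPrio mk_gJ s.toList (-1) (by omega)]


lemma loopC_eq (s acc : String) :
    List.foldl (fun (a c : String) => if PySem.Str.isIn c s then c else a) acc ["0", "1", "2", "3", "4", "5", "6", "7", "8"]
      = if 0 ≤ List.foldl (fun m x => max m (rkC x)) (-1) s.toList then gC (List.foldl (fun m x => max m (rkC x)) (-1) s.toList) else acc := by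
  have hub : List.foldl (fun m x => max m (rkC x)) (-1) s.toList ≤ 8 := mf_ub rkC 8 rkC_le s.toList (-1) (by omega)
  have hlb : (-1:Int) ≤ List.foldl (fun m x => max m (rkC x)) (-1) s.toList := mf_ge rkC s.toList (-1)
  have hmem : ∀ c ∈ s.toList, rkC c ≤ List.foldl (fun m x => max m (rkC x)) (-1) s.toList := fun c hc => mf_mem rkC c s.toList (-1) hc
  have hcs := mf_cases rkC s.toList (-1)
  simp only [List.foldl_cons, List.foldl_nil]
  generalize hM : List.foldl (fun m x => max m (rkC x)) (-1) s.toList = M at hub hlb hmem hcs ⊢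
  interval_cases M
  · -- M = -1: no priority character occurs in s
    have b0 : PySem.Str.isIn "0" s = false :=
      isInF "0" s '0' (by decide) (fun hm => absurd (hmem _ hm) (by decide))
    have b1 : PySem.Str.isIn "1" s = false :=
      isInF "1" s '1' (by decide) (fun hm => absurd (hmem _ hm) (by decide))
    have b2 : PySem.Str.isIn "2" s = false :=
      isInF "2" s '2' (by decide) (fun hm => absurd (hmem _ hm) (by decide))
    have b3 : PySem.Str.isIn "3" s = false :=
      isInF "3" s '3' (by decide) (fun hm => absurd (hmem _ hm) (by decide))
    have b4 : PySem.Str.isIn "4" s = false :=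
      isInF "4" s '4' (by decide) (fun hm => absurd (hmem _ hm) (by decide))
    have b5 : PySem.Str.isIn "5" s = false :=
      isInF "5" s '5' (by decide) (fun hm => absurd (hmem _ hm) (by decide))
    have b6 : PySem.Str.isIn "6" s = false :=
      isInF "6" s '6' (by decide) (fun hm => absurd (hmem _ hm) (by decide))
    have b7 : PySem.Str.isIn "7" s = false :=
      isInF "7" s '7' (by decide) (fun hm => absurd (hmem _ hm) (by decide))
    have b8 : PySem.Str.isIn "8" s = false :=
      isInF "8" s '8' (by decide) (fun hm => absurd (hmem _ hm) (by decide))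
    rw [if_neg (ne_true_of_eq_false b8), if_neg (ne_true_of_eq_false b7), if_neg (ne_true_of_eq_false b6), if_neg (ne_true_of_eq_false b5), if_neg (ne_true_of_eq_false b4), if_neg (ne_true_of_eq_false b3), if_neg (ne_true_of_eq_false b2), if_neg (ne_true_of_eq_false b1), if_neg (ne_true_of_eq_false b0), if_neg (by decide)]
  · -- M = 0
    rcases hcs with h | ⟨ch, hcmem, hrk⟩
    · exact absurd h (by decide)
    · have hge : (0:Int) ≤ rkC ch := by omega
      have h2 := rkC_inj ch hge
      rw [← hrk] at h2
      rw [(by decide : dC (0:Int) = '0')] at h2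
      rw [h2] at hcmem
      have bt : PySem.Str.isIn "0" s = true :=
        isInT "0" s '0' (by decide) hcmem
      have b8 : PySem.Str.isIn "8" s = false :=
        isInF "8" s '8' (by decide) (fun hm => absurd (hmem _ hm) (by decide))
      have b7 : PySem.Str.isIn "7" s = false :=
        isInF "7" s '7' (by decide) (fun hm => absurd (hmem _ hm) (by decide))
      have b6 : PySem.Str.isIn "6" s = false :=
        isInF "6" s '6' (by decide) (fun hm => absurd (hmem _ hm) (by decide))
      have b5 : PySem.Str.isIn "5" s = false :=
        isInF "5" s '5' (by decide) (fun hm => absurd (hmem _ hm) (by decide))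
      have b4 : PySem.Str.isIn "4" s = false :=
        isInF "4" s '4' (by decide) (fun hm => absurd (hmem _ hm) (by decide))
      have b3 : PySem.Str.isIn "3" s = false :=
        isInF "3" s '3' (by decide) (fun hm => absurd (hmem _ hm) (by decide))
      have b2 : PySem.Str.isIn "2" s = false :=
        isInF "2" s '2' (by decide) (fun hm => absurd (hmem _ hm) (by decide))
      have b1 : PySem.Str.isIn "1" s = false :=
        isInF "1" s '1' (by decide) (fun hm => absurd (hmem _ hm) (by decide))
      rw [if_neg (ne_true_of_eq_false b8), if_neg (ne_true_of_eq_false b7), if_neg (ne_true_of_eq_false b6), if_neg (ne_true_of_eq_false b5), if_neg (ne_true_of_eq_false b4), if_neg (ne_true_of_eq_false b3), if_neg (ne_true_of_eq_false b2), if_neg (ne_true_of_eq_false b1), if_pos bt, if_pos (by decide)]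
      decide
  · -- M = 1
    rcases hcs with h | ⟨ch, hcmem, hrk⟩
    · exact absurd h (by decide)
    · have hge : (0:Int) ≤ rkC ch := by omega
      have h2 := rkC_inj ch hge
      rw [← hrk] at h2
      rw [(by decide : dC (1:Int) = '1')] at h2
      rw [h2] at hcmem
      have bt : PySem.Str.isIn "1" s = true :=
        isInT "1" s '1' (by decide) hcmem
      have b8 : PySem.Str.isIn "8" s = false :=
        isInF "8" s '8' (by decide) (fun hm => absurd (hmem _ hm) (by decide))
      have b7 : PySem.Str.isIn "7" s = false :=
        isInF "7" s '7' (by decide) (fun hm => absurd (hmem _ hm) (by decide))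
      have b6 : PySem.Str.isIn "6" s = false :=
        isInF "6" s '6' (by decide) (fun hm => absurd (hmem _ hm) (by decide))
      have b5 : PySem.Str.isIn "5" s = false :=
        isInF "5" s '5' (by decide) (fun hm => absurd (hmem _ hm) (by decide))
      have b4 : PySem.Str.isIn "4" s = false :=
        isInF "4" s '4' (by decide) (fun hm => absurd (hmem _ hm) (by decide))
      have b3 : PySem.Str.isIn "3" s = false :=
        isInF "3" s '3' (by decide) (fun hm => absurd (hmem _ hm) (by decide))
      have b2 : PySem.Str.isIn "2" s = false :=
        isInF "2" s '2' (by decide) (fun hm => absurd (hmem _ hm) (by decide))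
      rw [if_neg (ne_true_of_eq_false b8), if_neg (ne_true_of_eq_false b7), if_neg (ne_true_of_eq_false b6), if_neg (ne_true_of_eq_false b5), if_neg (ne_true_of_eq_false b4), if_neg (ne_true_of_eq_false b3), if_neg (ne_true_of_eq_false b2), if_pos bt, if_pos (by decide)]
      decide
  · -- M = 2
    rcases hcs with h | ⟨ch, hcmem, hrk⟩
    · exact absurd h (by decide)
    · have hge : (0:Int) ≤ rkC ch := by omega
      have h2 := rkC_inj ch hge
      rw [← hrk] at h2
      rw [(by decide : dC (2:Int) = '2')] at h2
      rw [h2] at hcmem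
      have bt : PySem.Str.isIn "2" s = true :=
        isInT "2" s '2' (by decide) hcmem
      have b8 : PySem.Str.isIn "8" s = false :=
        isInF "8" s '8' (by decide) (fun hm => absurd (hmem _ hm) (by decide))
      have b7 : PySem.Str.isIn "7" s = false :=
        isInF "7" s '7' (by decide) (fun hm => absurd (hmem _ hm) (by decide))
      have b6 : PySem.Str.isIn "6" s = false :=
        isInF "6" s '6' (by decide) (fun hm => absurd (hmem _ hm) (by decide))
      have b5 : PySem.Str.isIn "5" s = false :=
        isInF "5" s '5' (by decide) (fun hm => absurd (hmem _ hm) (by decide))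
      have b4 : PySem.Str.isIn "4" s = false :=
        isInF "4" s '4' (by decide) (fun hm => absurd (hmem _ hm) (by decide))
      have b3 : PySem.Str.isIn "3" s = false :=
        isInF "3" s '3' (by decide) (fun hm => absurd (hmem _ hm) (by decide))
      rw [if_neg (ne_true_of_eq_false b8), if_neg (ne_true_of_eq_false b7), if_neg (ne_true_of_eq_false b6), if_neg (ne_true_of_eq_false b5), if_neg (ne_true_of_eq_false b4), if_neg (ne_true_of_eq_false b3), if_pos bt, if_pos (by decide)]
      decide
  · -- M = 3
    rcases hcs with h | ⟨ch, hcmem, hrk⟩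
    · exact absurd h (by decide)
    · have hge : (0:Int) ≤ rkC ch := by omega
      have h2 := rkC_inj ch hge
      rw [← hrk] at h2
      rw [(by decide : dC (3:Int) = '3')] at h2
      rw [h2] at hcmem
      have bt : PySem.Str.isIn "3" s = true :=
        isInT "3" s '3' (by decide) hcmem
      have b8 : PySem.Str.isIn "8" s = false :=
        isInF "8" s '8' (by decide) (fun hm => absurd (hmem _ hm) (by decide))
      have b7 : PySem.Str.isIn "7" s = false :=
        isInF "7" s '7' (by decide) (fun hm => absurd (hmem _ hm) (by decide))
      have b6 : PySem.Str.isIn "6" s = false :=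
        isInF "6" s '6' (by decide) (fun hm => absurd (hmem _ hm) (by decide))
      have b5 : PySem.Str.isIn "5" s = false :=
        isInF "5" s '5' (by decide) (fun hm => absurd (hmem _ hm) (by decide))
      have b4 : PySem.Str.isIn "4" s = false :=
        isInF "4" s '4' (by decide) (fun hm => absurd (hmem _ hm) (by decide))
      rw [if_neg (ne_true_of_eq_false b8), if_neg (ne_true_of_eq_false b7), if_neg (ne_true_of_eq_false b6), if_neg (ne_true_of_eq_false b5), if_neg (ne_true_of_eq_false b4), if_pos bt, if_pos (by decide)]
      decide
  · -- M = 4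
    rcases hcs with h | ⟨ch, hcmem, hrk⟩
    · exact absurd h (by decide)
    · have hge : (0:Int) ≤ rkC ch := by omega
      have h2 := rkC_inj ch hge
      rw [← hrk] at h2
      rw [(by decide : dC (4:Int) = '4')] at h2
      rw [h2] at hcmem
      have bt : PySem.Str.isIn "4" s = true :=
        isInT "4" s '4' (by decide) hcmem
      have b8 : PySem.Str.isIn "8" s = false :=
        isInF "8" s '8' (by decide) (fun hm => absurd (hmem _ hm) (by decide))
      have b7 : PySem.Str.isIn "7" s = false :=
        isInF "7" s '7' (by decide) (fun hm => absurd (hmem _ hm) (by decide))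
      have b6 : PySem.Str.isIn "6" s = false :=
        isInF "6" s '6' (by decide) (fun hm => absurd (hmem _ hm) (by decide))
      have b5 : PySem.Str.isIn "5" s = false :=
        isInF "5" s '5' (by decide) (fun hm => absurd (hmem _ hm) (by decide))
      rw [if_neg (ne_true_of_eq_false b8), if_neg (ne_true_of_eq_false b7), if_neg (ne_true_of_eq_false b6), if_neg (ne_true_of_eq_false b5), if_pos bt, if_pos (by decide)]
      decide
  · -- M = 5
    rcases hcs with h | ⟨ch, hcmem, hrk⟩
    · exact absurd h (by decide)
    · have hge : (0:Int) ≤ rkC ch := by omega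
      have h2 := rkC_inj ch hge
      rw [← hrk] at h2
      rw [(by decide : dC (5:Int) = '5')] at h2
      rw [h2] at hcmem
      have bt : PySem.Str.isIn "5" s = true :=
        isInT "5" s '5' (by decide) hcmem
      have b8 : PySem.Str.isIn "8" s = false :=
        isInF "8" s '8' (by decide) (fun hm => absurd (hmem _ hm) (by decide))
      have b7 : PySem.Str.isIn "7" s = false :=
        isInF "7" s '7' (by decide) (fun hm => absurd (hmem _ hm) (by decide))
      have b6 : PySem.Str.isIn "6" s = false :=
        isInF "6" s '6' (by decide) (fun hm => absurd (hmem _ hm) (by decide))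
      rw [if_neg (ne_true_of_eq_false b8), if_neg (ne_true_of_eq_false b7), if_neg (ne_true_of_eq_false b6), if_pos bt, if_pos (by decide)]
      decide
  · -- M = 6
    rcases hcs with h | ⟨ch, hcmem, hrk⟩
    · exact absurd h (by decide)
    · have hge : (0:Int) ≤ rkC ch := by omega
      have h2 := rkC_inj ch hge
      rw [← hrk] at h2
      rw [(by decide : dC (6:Int) = '6')] at h2
      rw [h2] at hcmem
      have bt : PySem.Str.isIn "6" s = true :=
        isInT "6" s '6' (by decide) hcmem
      have b8 : PySem.Str.isIn "8" s = false :=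
        isInF "8" s '8' (by decide) (fun hm => absurd (hmem _ hm) (by decide))
      have b7 : PySem.Str.isIn "7" s = false :=
        isInF "7" s '7' (by decide) (fun hm => absurd (hmem _ hm) (by decide))
      rw [if_neg (ne_true_of_eq_false b8), if_neg (ne_true_of_eq_false b7), if_pos bt, if_pos (by decide)]
      decide
  · -- M = 7
    rcases hcs with h | ⟨ch, hcmem, hrk⟩
    · exact absurd h (by decide)
    · have hge : (0:Int) ≤ rkC ch := by omega
      have h2 := rkC_inj ch hge
      rw [← hrk] at h2
      rw [(by decide : dC (7:Int) = '7')] at h2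
      rw [h2] at hcmem
      have bt : PySem.Str.isIn "7" s = true :=
        isInT "7" s '7' (by decide) hcmem
      have b8 : PySem.Str.isIn "8" s = false :=
        isInF "8" s '8' (by decide) (fun hm => absurd (hmem _ hm) (by decide))
      rw [if_neg (ne_true_of_eq_false b8), if_pos bt, if_pos (by decide)]
      decide
  · -- M = 8
    rcases hcs with h | ⟨ch, hcmem, hrk⟩
    · exact absurd h (by decide)
    · have hge : (0:Int) ≤ rkC ch := by omega
      have h2 := rkC_inj ch hge
      rw [← hrk] at h2
      rw [(by decide : dC (8:Int) = '8')] at h2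
      rw [h2] at hcmem
      have bt : PySem.Str.isIn "8" s = true :=
        isInT "8" s '8' (by decide) hcmem
      rw [if_pos bt, if_pos (by decide)]
      decide

lemma loopJ_eq (s acc : String) :
    List.foldl (fun (a c : String) => if PySem.Str.isIn c s then c else a) acc ["l", "L", "r", "R", "c", "C"]
      = if 0 ≤ List.foldl (fun m x => max m (rkJ x)) (-1) s.toList then gJ (List.foldl (fun m x => max m (rkJ x)) (-1) s.toList) else acc := by
  have hub : List.foldl (fun m x => max m (rkJ x)) (-1) s.toList ≤ 5 := mf_ub rkJ 5 rkJ_le s.toList (-1) (by omega)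
  have hlb : (-1:Int) ≤ List.foldl (fun m x => max m (rkJ x)) (-1) s.toList := mf_ge rkJ s.toList (-1)
  have hmem : ∀ c ∈ s.toList, rkJ c ≤ List.foldl (fun m x => max m (rkJ x)) (-1) s.toList := fun c hc => mf_mem rkJ c s.toList (-1) hc
  have hcs := mf_cases rkJ s.toList (-1)
  simp only [List.foldl_cons, List.foldl_nil]
  generalize hM : List.foldl (fun m x => max m (rkJ x)) (-1) s.toList = M at hub hlb hmem hcs ⊢
  interval_cases M
  · -- M = -1: no priority character occurs in s
    have b0 : PySem.Str.isIn "l" s = false :=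
      isInF "l" s 'l' (by decide) (fun hm => absurd (hmem _ hm) (by decide))
    have b1 : PySem.Str.isIn "L" s = false :=
      isInF "L" s 'L' (by decide) (fun hm => absurd (hmem _ hm) (by decide))
    have b2 : PySem.Str.isIn "r" s = false :=
      isInF "r" s 'r' (by decide) (fun hm => absurd (hmem _ hm) (by decide))
    have b3 : PySem.Str.isIn "R" s = false :=
      isInF "R" s 'R' (by decide) (fun hm => absurd (hmem _ hm) (by decide))
    have b4 : PySem.Str.isIn "c" s = false :=
      isInF "c" s 'c' (by decide) (fun hm => absurd (hmem _ hm) (by decide))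
    have b5 : PySem.Str.isIn "C" s = false :=
      isInF "C" s 'C' (by decide) (fun hm => absurd (hmem _ hm) (by decide))
    rw [if_neg (ne_true_of_eq_false b5), if_neg (ne_true_of_eq_false b4), if_neg (ne_true_of_eq_false b3), if_neg (ne_true_of_eq_false b2), if_neg (ne_true_of_eq_false b1), if_neg (ne_true_of_eq_false b0), if_neg (by decide)]
  · -- M = 0
    rcases hcs with h | ⟨ch, hcmem, hrk⟩
    · exact absurd h (by decide)
    · have hge : (0:Int) ≤ rkJ ch := by omega
      have h2 := rkJ_inj ch hge
      rw [← hrk] at h2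
      rw [(by decide : dJ (0:Int) = 'l')] at h2
      rw [h2] at hcmem
      have bt : PySem.Str.isIn "l" s = true :=
        isInT "l" s 'l' (by decide) hcmem
      have b5 : PySem.Str.isIn "C" s = false :=
        isInF "C" s 'C' (by decide) (fun hm => absurd (hmem _ hm) (by decide))
      have b4 : PySem.Str.isIn "c" s = false :=
        isInF "c" s 'c' (by decide) (fun hm => absurd (hmem _ hm) (by decide))
      have b3 : PySem.Str.isIn "R" s = false :=
        isInF "R" s 'R' (by decide) (fun hm => absurd (hmem _ hm) (by decide))
      have b2 : PySem.Str.isIn "r" s = false :=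
        isInF "r" s 'r' (by decide) (fun hm => absurd (hmem _ hm) (by decide))
      have b1 : PySem.Str.isIn "L" s = false :=
        isInF "L" s 'L' (by decide) (fun hm => absurd (hmem _ hm) (by decide))
      rw [if_neg (ne_true_of_eq_false b5), if_neg (ne_true_of_eq_false b4), if_neg (ne_true_of_eq_false b3), if_neg (ne_true_of_eq_false b2), if_neg (ne_true_of_eq_false b1), if_pos bt, if_pos (by decide)]
      decide
  · -- M = 1
    rcases hcs with h | ⟨ch, hcmem, hrk⟩
    · exact absurd h (by decide)
    · have hge : (0:Int) ≤ rkJ ch := by omega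
      have h2 := rkJ_inj ch hge
      rw [← hrk] at h2
      rw [(by decide : dJ (1:Int) = 'L')] at h2
      rw [h2] at hcmem
      have bt : PySem.Str.isIn "L" s = true :=
        isInT "L" s 'L' (by decide) hcmem
      have b5 : PySem.Str.isIn "C" s = false :=
        isInF "C" s 'C' (by decide) (fun hm => absurd (hmem _ hm) (by decide))
      have b4 : PySem.Str.isIn "c" s = false :=
        isInF "c" s 'c' (by decide) (fun hm => absurd (hmem _ hm) (by decide))
      have b3 : PySem.Str.isIn "R" s = false :=
        isInF "R" s 'R' (by decide) (fun hm => absurd (hmem _ hm) (by decide))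
      have b2 : PySem.Str.isIn "r" s = false :=
        isInF "r" s 'r' (by decide) (fun hm => absurd (hmem _ hm) (by decide))
      rw [if_neg (ne_true_of_eq_false b5), if_neg (ne_true_of_eq_false b4), if_neg (ne_true_of_eq_false b3), if_neg (ne_true_of_eq_false b2), if_pos bt, if_pos (by decide)]
      decide
  · -- M = 2
    rcases hcs with h | ⟨ch, hcmem, hrk⟩
    · exact absurd h (by decide)
    · have hge : (0:Int) ≤ rkJ ch := by omega
      have h2 := rkJ_inj ch hge
      rw [← hrk] at h2
      rw [(by decide : dJ (2:Int) = 'r')] at h2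
      rw [h2] at hcmem
      have bt : PySem.Str.isIn "r" s = true :=
        isInT "r" s 'r' (by decide) hcmem
      have b5 : PySem.Str.isIn "C" s = false :=
        isInF "C" s 'C' (by decide) (fun hm => absurd (hmem _ hm) (by decide))
      have b4 : PySem.Str.isIn "c" s = false :=
        isInF "c" s 'c' (by decide) (fun hm => absurd (hmem _ hm) (by decide))
      have b3 : PySem.Str.isIn "R" s = false :=
        isInF "R" s 'R' (by decide) (fun hm => absurd (hmem _ hm) (by decide))
      rw [if_neg (ne_true_of_eq_false b5), if_neg (ne_true_of_eq_false b4), if_neg (ne_true_of_eq_false b3), if_pos bt, if_pos (by decide)]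
      decide
  · -- M = 3
    rcases hcs with h | ⟨ch, hcmem, hrk⟩
    · exact absurd h (by decide)
    · have hge : (0:Int) ≤ rkJ ch := by omega
      have h2 := rkJ_inj ch hge
      rw [← hrk] at h2
      rw [(by decide : dJ (3:Int) = 'R')] at h2
      rw [h2] at hcmem
      have bt : PySem.Str.isIn "R" s = true :=
        isInT "R" s 'R' (by decide) hcmem
      have b5 : PySem.Str.isIn "C" s = false :=
        isInF "C" s 'C' (by decide) (fun hm => absurd (hmem _ hm) (by decide))
      have b4 : PySem.Str.isIn "c" s = false :=
        isInF "c" s 'c' (by decide) (fun hm => absurd (hmem _ hm) (by decide))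
      rw [if_neg (ne_true_of_eq_false b5), if_neg (ne_true_of_eq_false b4), if_pos bt, if_pos (by decide)]
      decide
  · -- M = 4
    rcases hcs with h | ⟨ch, hcmem, hrk⟩
    · exact absurd h (by decide)
    · have hge : (0:Int) ≤ rkJ ch := by omega
      have h2 := rkJ_inj ch hge
      rw [← hrk] at h2
      rw [(by decide : dJ (4:Int) = 'c')] at h2
      rw [h2] at hcmem
      have bt : PySem.Str.isIn "c" s = true :=
        isInT "c" s 'c' (by decide) hcmem
      have b5 : PySem.Str.isIn "C" s = false :=
        isInF "C" s 'C' (by decide) (fun hm => absurd (hmem _ hm) (by decide))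
      rw [if_neg (ne_true_of_eq_false b5), if_pos bt, if_pos (by decide)]
      decide
  · -- M = 5
    rcases hcs with h | ⟨ch, hcmem, hrk⟩
    · exact absurd h (by decide)
    · have hge : (0:Int) ≤ rkJ ch := by omega
      have h2 := rkJ_inj ch hge
      rw [← hrk] at h2
      rw [(by decide : dJ (5:Int) = 'C')] at h2
      rw [h2] at hcmem
      have bt : PySem.Str.isIn "C" s = true :=
        isInT "C" s 'C' (by decide) hcmem
      rw [if_pos bt, if_pos (by decide)]
      decide


lemma color_eq (attr defattr : String) :
    List.foldl (fun (a c : String) => if PySem.Str.isIn c attr then c else a)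
      (List.foldl (fun (a c : String) => if PySem.Str.isIn c defattr then c else a) "" ["0", "1", "2", "3", "4", "5", "6", "7", "8"])
      ["0", "1", "2", "3", "4", "5", "6", "7", "8"]
    = if pickPort attr colorPrioD ≠ "" then pickPort attr colorPrioD else pickPort defattr colorPrioD := by
  rw [loopC_eq attr, loopC_eq defattr, pickPort_eq_color attr, pickPort_eq_color defattr]
  have hua := mf_ub rkC 8 rkC_le attr.toList (-1) (by omega)
  have hud := mf_ub rkC 8 rkC_le defattr.toList (-1) (by omega)
  by_cases ha : 0 ≤ List.foldl (fun m x => max m (rkC x)) (-1) attr.toList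
  · rw [if_pos ha, if_pos (gC_ne (List.foldl (fun m x => max m (rkC x)) (-1) attr.toList) ha hua)]
  · rw [if_neg ha, gC_neg (List.foldl (fun m x => max m (rkC x)) (-1) attr.toList) (by omega),
      if_neg (not_not_intro rfl)]
    by_cases hd : 0 ≤ List.foldl (fun m x => max m (rkC x)) (-1) defattr.toList
    · rw [if_pos hd]
    · rw [if_neg hd, gC_neg (List.foldl (fun m x => max m (rkC x)) (-1) defattr.toList) (by omega)]

lemma just_eq (attr defattr : String) :
    List.foldl (fun (a c : String) => if PySem.Str.isIn c attr then c else a)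
      (List.foldl (fun (a c : String) => if PySem.Str.isIn c defattr then c else a) "" ["l", "L", "r", "R", "c", "C"])
      ["l", "L", "r", "R", "c", "C"]
    = if pickPort attr justPrioD ≠ "" then pickPort attr justPrioD else pickPort defattr justPrioD := by
  rw [loopJ_eq attr, loopJ_eq defattr, pickPort_eq_just attr, pickPort_eq_just defattr]
  have hua := mf_ub rkJ 5 rkJ_le attr.toList (-1) (by omega)
  have hud := mf_ub rkJ 5 rkJ_le defattr.toList (-1) (by omega)
  by_cases ha : 0 ≤ List.foldl (fun m x => max m (rkJ x)) (-1) attr.toList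
  · rw [if_pos ha, if_pos (gJ_ne (List.foldl (fun m x => max m (rkJ x)) (-1) attr.toList) ha hua)]
  · rw [if_neg ha, gJ_neg (List.foldl (fun m x => max m (rkJ x)) (-1) attr.toList) (by omega),
      if_neg (not_not_intro rfl)]
    by_cases hd : 0 ≤ List.foldl (fun m x => max m (rkJ x)) (-1) defattr.toList
    · rw [if_pos hd]
    · rw [if_neg hd, gJ_neg (List.foldl (fun m x => max m (rkJ x)) (-1) defattr.toList) (by omega)]

-- ===== VERDICT (by name: the statement is the Claim_ definition above) =====
theorem combineattr_spec : Claim_equal_combineattr := by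
  intro attr defattr _
  simp only [Spec_combineattr, combineattr, combineattr_alt]
  rw [color_eq attr defattr, just_eq attr defattr]
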